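-- pv_equiv track=rewrite | github.com/Omena0/lambda-ext | lambda/main.py | split_into_statements
-- ===== SOURCE A (Python) =====
-- def split_into_statements(processed_lines):
--     """Split processed lines into separate statements based on parentheses balance and logical breaks."""
--     statements = []
--     current_statement = []
--     paren_depth = 0
--     brace_depth = 0
--
--     i = 0
--     while i < len(processed_lines):
--         line = processed_lines[i].strip()
--
--         if not line:
--             # Empty line might indicate statement boundary if we're at depth 0
--             if paren_depth == 0 and brace_depth == 0 and current_statement:
--                 statement_text = ' '.join(current_statement).strip()
--                 if statement_text:
--                     statements.append(current_statement.copy())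
--                 current_statement = []
--             i += 1
--             continue
--
--         # Count parentheses and braces to track nesting depth
--         for char in line:
--             if char == '(':
--                 paren_depth += 1
--             elif char == ')':
--                 paren_depth -= 1
--             elif char == '{':
--                 brace_depth += 1
--             elif char == '}':
--                 brace_depth -= 1
--
--         current_statement.append(line)
--
--         # Check if this completes a balanced expression
--         if paren_depth == 0 and brace_depth == 0:
--             # Look ahead to see if the next non-empty line suggests a new statement
--             next_non_empty = None
--             j = i + 1
--             while j < len(processed_lines):
--                 next_line = processed_lines[j].strip()
--                 if next_line:
--                     next_non_empty = next_line
--                     break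
--                 j += 1
--
--             # If there's a next line and it doesn't start with an operator or continuation,
--             # this is likely a statement boundary
--             if (next_non_empty is None or
--                 not next_non_empty.startswith((')', '}', '+', '-', '*', '/', '&&', '||', '.', ','))):
--                 statement_text = ' '.join(current_statement).strip()
--                 if statement_text:
--                     statements.append(current_statement.copy())
--                 current_statement = []
--
--         i += 1
--
--     # Handle any remaining statement
--     if current_statement:
--         statement_text = ' '.join(current_statement).strip()
--         if statement_text:
--             statements.append(current_statement)
--
--     return statements
-- ===== SOURCE B (Python) =====
-- CONT = (')', '}', '+', '-', '*', '/', '&&', '||', '.', ',')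
--
-- def split_into_statements(processed_lines):
--     """Two-pass rewrite: strip once, precompute each line's next non-empty
--     line back-to-front, then group in a single flat pass using per-line
--     net paren/brace counts instead of a per-character scan."""
--     stripped = [l.strip() for l in processed_lines]
--     n = len(stripped)
--     nxt = [None] * n
--     later = None
--     for i in range(n - 1, -1, -1):
--         nxt[i] = later
--         if stripped[i]:
--             later = stripped[i]
--     statements = []
--     group = []
--     pd = bd = 0
--     for line, after in zip(stripped, nxt):
--         if not line:
--             if pd == 0 and bd == 0 and group:
--                 statements.append(group)
--                 group = []
--             continue
--         pd += line.count('(') - line.count(')')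
--         bd += line.count('{') - line.count('}')
--         group.append(line)
--         if pd == 0 and bd == 0 and (after is None or not after.startswith(CONT)):
--             statements.append(group)
--             group = []
--     if group:
--         statements.append(group)
--     return statements
-- ===== Notes on version B (the rewrite author's own statement) =====
-- stated objective: alternative
-- what changed: Replaces A's single interleaved index loop (per-character depth scan and an inner while-loop lookahead at every balanced line) with two flat passes: a backward pass precomputing each line's next non-empty stripped line, then one forward grouping pass using per-line substring counts for the depth deltas.
import Mathlib
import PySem

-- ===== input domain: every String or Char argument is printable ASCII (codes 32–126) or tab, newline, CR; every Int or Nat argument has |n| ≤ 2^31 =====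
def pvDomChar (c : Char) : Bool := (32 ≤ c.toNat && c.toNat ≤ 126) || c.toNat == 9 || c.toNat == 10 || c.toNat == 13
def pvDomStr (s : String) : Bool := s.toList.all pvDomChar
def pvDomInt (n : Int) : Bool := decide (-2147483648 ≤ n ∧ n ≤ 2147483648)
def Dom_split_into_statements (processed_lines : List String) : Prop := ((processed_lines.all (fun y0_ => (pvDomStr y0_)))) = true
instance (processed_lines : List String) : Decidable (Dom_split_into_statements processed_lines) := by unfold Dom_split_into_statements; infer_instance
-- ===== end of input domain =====

-- B replaces A's single interleaved index loop (per-char depth scan + inner lookahead loop)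
-- with two flat passes: a backward pass precomputing each line's next non-empty stripped line,
-- then one forward grouping pass using per-line substring counts (objective: alternative).

-- ===== PORT A =====
-- continuation prefixes of the startswith tuple (shared by both ports)
def contPrefixes : List String := [")", "}", "+", "-", "*", "/", "&&", "||", ".", ","]

def isCont : Option String → Bool
  | none => false
  | some s => contPrefixes.any (fun p => PySem.Str.startswith s p)

-- the per-character if/elif chain updating (paren_depth, brace_depth)
def charStep : Int × Int → Char → Int × Int
  | (pd, bd), c =>
    if c = '(' then (pd + 1, bd)
    else if c = ')' then (pd - 1, bd)
    else if c = '{' then (pd, bd + 1)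
    else if c = '}' then (pd, bd - 1)
    else (pd, bd)

-- the inner `while j < len(...)` lookahead for the next non-empty stripped line
def lookaheadA : List String → Option String
  | [] => none
  | l :: ls =>
    let s := PySem.Str.strip l
    if s = "" then lookaheadA ls else some s

-- the main `while i < len(processed_lines)` loop
def loopA : List String → List (List String) → List String → Int → Int → List (List String)
  | [], statements, cur, _, _ =>
    if cur ≠ [] then
      (if PySem.Str.strip (PySem.Str.join " " cur) ≠ "" then statements ++ [cur] else statements)
    else statements
  | l :: rest, statements, cur, pd, bd =>
    let line := PySem.Str.strip l
    if line = "" then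
      (if pd = 0 ∧ bd = 0 ∧ cur ≠ [] then
        (if PySem.Str.strip (PySem.Str.join " " cur) ≠ "" then loopA rest (statements ++ [cur]) [] pd bd
         else loopA rest statements [] pd bd)
       else loopA rest statements cur pd bd)
    else
      let d := line.toList.foldl charStep (pd, bd)
      let cur' := cur ++ [line]
      if d.1 = 0 ∧ d.2 = 0 then
        (if isCont (lookaheadA rest) = false then
          (if PySem.Str.strip (PySem.Str.join " " cur') ≠ "" then loopA rest (statements ++ [cur']) [] d.1 d.2
           else loopA rest statements [] d.1 d.2)
         else loopA rest statements cur' d.1 d.2)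
      else loopA rest statements cur' d.1 d.2

def split_into_statements (processed_lines : List String) : List (List String) :=
  loopA processed_lines [] [] 0 0

-- ===== PORT B =====
-- backward pass: for each (already stripped) line, the next non-empty line to its right;
-- .2 is the running `later` value (first non-empty line of the whole list)
def buildNxt : List String → List (Option String) × Option String
  | [] => ([], none)
  | s :: rest =>
    let r := buildNxt rest
    (r.2 :: r.1, if s ≠ "" then some s else r.2)

-- forward grouping pass over the (stripped line, next non-empty) pairs
def loopB : List (String × Option String) → List (List String) → List String → Int → Int → List (List String)
  | [], statements, group, _, _ => if group ≠ [] then statements ++ [group] else statements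
  | (line, after) :: rest, statements, group, pd, bd =>
    if line = "" then
      (if pd = 0 ∧ bd = 0 ∧ group ≠ [] then loopB rest (statements ++ [group]) [] pd bd
       else loopB rest statements group pd bd)
    else
      let pd' := pd + (PySem.Str.count line "(" : Int) - (PySem.Str.count line ")" : Int)
      let bd' := bd + (PySem.Str.count line "{" : Int) - (PySem.Str.count line "}" : Int)
      let group' := group ++ [line]
      if pd' = 0 ∧ bd' = 0 ∧ isCont after = false then loopB rest (statements ++ [group']) [] pd' bd'
      else loopB rest statements group' pd' bd'

def split_into_statements_alt (processed_lines : List String) : List (List String) :=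
  let stripped := processed_lines.map PySem.Str.strip
  loopB (stripped.zip (buildNxt stripped).1) [] [] 0 0

-- ===== PRECONDITION & SPEC =====
def Spec_split_into_statements (processed_lines : List String) (out : List (List String)) : Prop := out = split_into_statements_alt processed_lines
instance (processed_lines : List String) (out : List (List String)) : Decidable (Spec_split_into_statements processed_lines out) := by unfold Spec_split_into_statements; infer_instance

-- ===== CLAIM (what is proved, stated in full; the proofs are below) =====
def Claim_equal_split_into_statements : Prop := ∀ (processed_lines : List String), Dom_split_into_statements processed_lines → Spec_split_into_statements processed_lines (split_into_statements processed_lines)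

-- ===== LEMMAS AND PROOFS =====

-- counting a single-character pattern is plain character counting
lemma count_go_singleton (c : Char) : ∀ (cs : List Char) (fuel acc : Nat), cs.length ≤ fuel →
    PySem.Chars.count.go [c] fuel cs acc = acc + cs.count c := by
  intro cs
  induction cs with
  | nil => intro fuel acc _; cases fuel <;> simp [PySem.Chars.count.go]
  | cons ch t ih =>
    intro fuel acc hle
    cases fuel with
    | zero => simp at hle
    | succ fuel =>
      have hle' : t.length ≤ fuel := by simpa using hle
      by_cases hc : c = ch
      · subst hc
        simp [PySem.Chars.count.go, List.isPrefixOf, ih _ _ hle']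
        omega
      · simp [PySem.Chars.count.go, List.isPrefixOf, hc, ih _ _ hle', Ne.symm hc]

lemma count_singleton (cs : List Char) (c : Char) : PySem.Chars.count cs [c] = cs.count c := by
  simpa using count_go_singleton c cs cs.length 0 le_rfl

-- A's per-character depth loop computes the net substring counts B uses
lemma foldl_charStep (cs : List Char) : ∀ pd bd : Int, cs.foldl charStep (pd, bd) =
    (pd + (cs.count '(' : Int) - (cs.count ')' : Int),
     bd + (cs.count '{' : Int) - (cs.count '}' : Int)) := by
  induction cs with
  | nil => intro pd bd; simp
  | cons ch t ih =>
    intro pd bd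
    by_cases h1 : ch = '('
    · subst h1; simp [charStep, ih]; omega
    · by_cases h2 : ch = ')'
      · subst h2; simp [charStep, ih, h1]
        omega
      · by_cases h3 : ch = '{'
        · subst h3; simp [charStep, ih, h1, h2]
          omega
        · by_cases h4 : ch = '}'
          · subst h4; simp [charStep, ih, h1, h2, h3]
            omega
          · simp [charStep, h1, h2, h3, h4, ih]

-- non-space characters survive dropWhile isspace
lemma mem_dropWhile_of_not_space {cs : List Char} {p : Char → Bool} {c : Char}
    (h : c ∈ cs) (hp : p c = false) : c ∈ cs.dropWhile p := by
  rcases (List.mem_append.1 (by rw [List.takeWhile_append_dropWhile]; exact h :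
      c ∈ cs.takeWhile p ++ cs.dropWhile p)) with h1 | h2
  · exact absurd (List.mem_takeWhile_imp h1) (by simp [hp])
  · exact h2

lemma mem_strip_of_not_space {cs : List Char} {c : Char}
    (h : c ∈ cs) (hp : PySem.Chars.isspace c = false) : c ∈ PySem.Chars.strip cs := by
  unfold PySem.Chars.strip PySem.Chars.lstrip PySem.Chars.rstrip
  have h1 : c ∈ cs.dropWhile PySem.Chars.isspace := mem_dropWhile_of_not_space h hp
  have h2 : c ∈ (cs.dropWhile PySem.Chars.isspace).reverse := by simpa using h1
  simpa using mem_dropWhile_of_not_space h2 hp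

lemma strip_ne_nil_exists {cs : List Char} (h : PySem.Chars.strip cs ≠ []) :
    ∃ c ∈ cs, PySem.Chars.isspace c = false := by
  by_contra hall
  push Not at hall
  apply h
  have hdw : cs.dropWhile PySem.Chars.isspace = [] := by
    rw [List.dropWhile_eq_nil_iff]
    intro c hc
    have := hall c hc
    cases hx : PySem.Chars.isspace c
    · exact absurd hx this
    · rfl
  simp [PySem.Chars.strip, PySem.Chars.lstrip, PySem.Chars.rstrip, hdw]

lemma toList_ne_nil_ne_empty {s : String} (h : s.toList ≠ []) : s ≠ "" := by
  intro he; subst he; simp at h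

-- a stripped non-empty line contains a non-space character
lemma exists_nonspace_of_strip_ne {l : String} (h : PySem.Str.strip l ≠ "") :
    ∃ c ∈ (PySem.Str.strip l).toList, PySem.Chars.isspace c = false := by
  have hnil : PySem.Chars.strip l.toList ≠ [] := by
    intro hx
    exact h (by simp [PySem.Str.strip, hx])
  obtain ⟨c, hc, hcs⟩ := strip_ne_nil_exists hnil
  exact ⟨c, by simpa [PySem.Str.strip] using mem_strip_of_not_space hc hcs, hcs⟩

-- if every line in cur contains a non-space char, the joined statement text is non-empty
lemma flush_ne {cur : List String} (hne : cur ≠ [])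
    (hinv : ∀ e ∈ cur, ∃ c ∈ e.toList, PySem.Chars.isspace c = false) :
    PySem.Str.strip (PySem.Str.join " " cur) ≠ "" := by
  obtain ⟨e, rest, rfl⟩ : ∃ e rest, cur = e :: rest := by
    cases cur with
    | nil => exact absurd rfl hne
    | cons e rest => exact ⟨e, rest, rfl⟩
  obtain ⟨c, hc, hcs⟩ := hinv e (List.mem_cons_self ..)
  apply toList_ne_nil_ne_empty
  have hj : c ∈ PySem.Chars.join " ".toList ((e :: rest).map String.toList) := by
    cases rest with
    | nil => simpa [PySem.Chars.join, List.intercalate] using hc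
    | cons b bs =>
      simp only [List.map_cons, PySem.Chars.join_cons_cons]
      exact List.mem_append.2 (Or.inl (List.mem_append.2 (Or.inl hc)))
  have : c ∈ (PySem.Str.strip (PySem.Str.join " " (e :: rest))).toList := by
    simp only [PySem.Str.toList_strip, PySem.Str.join, String.toList_ofList]
    exact mem_strip_of_not_space hj hcs
  intro hx
  rw [hx] at this
  simp at this

lemma buildNxt_snd (ls : List String) :
    (buildNxt (ls.map PySem.Str.strip)).2 = lookaheadA ls := by
  induction ls with
  | nil => simp [buildNxt, lookaheadA]
  | cons l rest ih =>
    simp only [List.map_cons, buildNxt, lookaheadA, ih]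
    by_cases h : PySem.Str.strip l = "" <;> simp [h]

set_option maxHeartbeats 1000000 in
lemma loop_eq : ∀ (ls : List String) (st : List (List String)) (cur : List String) (pd bd : Int),
    (∀ e ∈ cur, ∃ c ∈ e.toList, PySem.Chars.isspace c = false) →
    loopA ls st cur pd bd =
      loopB ((ls.map PySem.Str.strip).zip (buildNxt (ls.map PySem.Str.strip)).1) st cur pd bd := by
  intro ls
  induction ls with
  | nil =>
    intro st cur pd bd hinv
    by_cases hc : cur = []
    · simp [loopA, loopB, hc]
    · simp [loopA, loopB, hc, flush_ne hc hinv]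
  | cons l rest ih =>
    intro st cur pd bd hinv
    simp only [List.map_cons, buildNxt, List.zip_cons_cons, loopA, loopB, buildNxt_snd]
    by_cases hline : PySem.Str.strip l = ""
    · simp only [hline, reduceIte]
      by_cases hcond : pd = 0 ∧ bd = 0 ∧ cur ≠ []
      · rw [if_pos hcond, if_pos hcond, if_pos (flush_ne hcond.2.2 hinv)]
        exact ih _ _ _ _ (by simp)
      · rw [if_neg hcond, if_neg hcond]
        exact ih _ _ _ _ hinv
    · rw [if_neg hline, if_neg hline]
      have hinv' : ∀ e ∈ cur ++ [PySem.Str.strip l], ∃ c ∈ e.toList, PySem.Chars.isspace c = false := by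
        intro e he
        rcases List.mem_append.1 he with h1 | h2
        · exact hinv e h1
        · simp at h2; subst h2; exact exists_nonspace_of_strip_ne hline
      have hd : (PySem.Str.strip l).toList.foldl charStep (pd, bd) =
          (pd + (PySem.Str.count (PySem.Str.strip l) "(" : Int) - (PySem.Str.count (PySem.Str.strip l) ")" : Int),
           bd + (PySem.Str.count (PySem.Str.strip l) "{" : Int) - (PySem.Str.count (PySem.Str.strip l) "}" : Int)) := by
        rw [foldl_charStep]; simp [PySem.Str.count, count_singleton]
      rw [hd]
      dsimp only
      generalize (pd + (PySem.Str.count (PySem.Str.strip l) "(" : Int) - (PySem.Str.count (PySem.Str.strip l) ")" : Int)) = pd'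
      generalize (bd + (PySem.Str.count (PySem.Str.strip l) "{" : Int) - (PySem.Str.count (PySem.Str.strip l) "}" : Int)) = bd'
      by_cases hz : pd' = 0 ∧ bd' = 0
      · by_cases hb : isCont (lookaheadA rest) = false
        · rw [if_pos hz, if_pos hb, if_pos (flush_ne (by simp) hinv')]
          rw [if_pos (And.intro hz.1 (And.intro hz.2 hb))]
          exact ih _ _ _ _ (by simp)
        · rw [if_pos hz, if_neg hb, if_neg (by tauto)]
          exact ih _ _ _ _ hinv'
      · rw [if_neg hz, if_neg (by tauto)]
        exact ih _ _ _ _ hinv'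

-- ===== VERDICT (by name: the statement is the Claim_ definition above) =====
theorem split_into_statements_spec : Claim_equal_split_into_statements := by
  intro pl _
  unfold Spec_split_into_statements split_into_statements split_into_statements_alt
  exact loop_eq pl [] [] 0 0 (by simp)
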